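-- pv_equiv track=rewrite | github.com/ChmyrevVladislav/Chmyrev.Vladislav | day11/part2.py | contains_two_pairs
-- ===== SOURCE A (Python) =====
-- def contains_two_pairs(string):
--     pairs = []
--     prev = None
--     for char in string:
--         if char == prev and char not in pairs:
--             pairs.append(char)
--         prev = char
--     return len(pairs) >= 2
-- ===== SOURCE B (Python) =====
-- def contains_two_pairs(string):
--     # Stage 1: run-length encode the string into maximal runs of equal chars.
--     runs = []
--     i = 0
--     n = len(string)
--     while i < n:
--         j = i
--         while j < n and string[j] == string[i]:
--             j += 1
--         runs.append((string[i], j - i))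
--         i = j
--     # Stage 2: distinct characters that own a run of length >= 2.
--     return len({c for c, ln in runs if ln >= 2}) >= 2
-- ===== Notes on version B (the rewrite author's own statement) =====
-- stated objective: alternative
-- what changed: Two staged passes instead of A's single prev-tracking pass with a membership-tested growing list: first run-length encode the string into maximal runs, then count the distinct characters owning a run of length >= 2.
import Mathlib
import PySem

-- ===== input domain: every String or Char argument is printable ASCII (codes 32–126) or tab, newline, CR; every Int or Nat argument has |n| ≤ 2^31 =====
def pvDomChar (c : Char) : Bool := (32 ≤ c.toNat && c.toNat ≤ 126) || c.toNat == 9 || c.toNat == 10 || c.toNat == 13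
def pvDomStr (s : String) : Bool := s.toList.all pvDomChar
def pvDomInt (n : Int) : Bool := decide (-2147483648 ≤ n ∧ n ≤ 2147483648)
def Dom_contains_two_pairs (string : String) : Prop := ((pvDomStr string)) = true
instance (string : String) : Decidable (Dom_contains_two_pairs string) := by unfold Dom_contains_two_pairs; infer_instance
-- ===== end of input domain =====

-- B replaces A's single prev-tracking pass (membership-tested growing list) by two
-- staged passes: run-length encode into maximal runs, then count distinct characters
-- owning a run of length >= 2; same return value.

-- ===== PORT A =====
-- the for-loop over the string, carrying (pairs, prev)
def pvALoop : List Char → List Char → Option Char → List Char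
  | [], pairs, _ => pairs
  | c :: rest, pairs, prev =>
      pvALoop rest
        (if (some c == prev) && !(pairs.contains c) then pairs ++ [c] else pairs)
        (some c)

def contains_two_pairs (string : String) : Bool :=
  decide (2 ≤ (pvALoop string.toList [] none).length)

-- ===== PORT B =====
-- Stage 1 of Source B: the outer while loop producing the run-length encoding; the inner
-- while loop counting string[j] == string[i] is the takeWhile/dropWhile split.
def pvRuns : List Char → List (Char × Nat)
  | [] => []
  | c :: rest =>
      (c, (rest.takeWhile (· == c)).length + 1) ::
        pvRuns (rest.dropWhile (· == c))
  termination_by l => l.length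
  decreasing_by
    simpa using Nat.lt_succ_of_le (List.length_dropWhile_le _ _)

def contains_two_pairs_alt (string : String) : Bool :=
  decide (2 ≤ (PySem.Set.ofList
    ((pvRuns string.toList).filterMap
      (fun p => if 2 ≤ p.2 then some p.1 else none))).length)

-- ===== PRECONDITION & SPEC =====
def Spec_contains_two_pairs (string : String) (out : Bool) : Prop := out = contains_two_pairs_alt string
instance (string : String) (out : Bool) : Decidable (Spec_contains_two_pairs string out) := by unfold Spec_contains_two_pairs; infer_instance

-- ===== CLAIM (what is proved, stated in full; the proofs are below) =====
def Claim_equal_contains_two_pairs : Prop := ∀ (string : String), Dom_contains_two_pairs string → Spec_contains_two_pairs string (contains_two_pairs string)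

-- ===== LEMMAS AND PROOFS =====

-- the chars A's loop appends, in order (with possible repeats before dedup)
def pvAdj : Option Char → List Char → List Char
  | _, [] => []
  | prev, c :: rest => (if some c == prev then [c] else []) ++ pvAdj (some c) rest

theorem pvALoop_eq (l : List Char) : ∀ (pairs : List Char) (prev : Option Char),
    pvALoop l pairs prev = (pvAdj prev l).foldl PySem.Set.add pairs := by
  induction l with
  | nil => intro pairs prev; rfl
  | cons c rest ih =>
    intro pairs prev
    simp only [pvALoop, pvAdj, ih]
    by_cases h : some c = prev
    · simp [h, PySem.Set.add, PySem.Set.contains]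
    · simp [h]

-- the run keys B keeps
def pvKeys (l : List Char) : List Char :=
  (pvRuns l).filterMap (fun p => if 2 ≤ p.2 then some p.1 else none)

theorem pvAdj_run (c : Char) (l : List Char) :
    pvAdj (some c) l =
      List.replicate (l.takeWhile (· == c)).length c ++
        pvAdj none (l.dropWhile (· == c)) := by
  induction l generalizing c with
  | nil => rfl
  | cons d rs ih =>
    simp only [List.takeWhile_cons, List.dropWhile_cons]
    by_cases h : d = c
    · subst h
      simp [pvAdj, List.replicate_succ, ih d]
    · have hb : (d == c) = false := by simp [h]
      simp only [pvAdj, hb]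
      simp only [show (some d == some c) = false by simp [h]]
      cases rs with
      | nil => rfl
      | cons e es => simp [pvAdj]

theorem pvMem_adj_keys (l : List Char) : ∀ x, x ∈ pvAdj none l ↔ x ∈ pvKeys l := by
  induction l using pvRuns.induct with
  | case1 => intro x; simp [pvAdj, pvKeys, pvRuns]
  | case2 c rest ih =>
    intro x
    have hadj : pvAdj none (c :: rest) = pvAdj (some c) rest := by
      cases rest with
      | nil => rfl
      | cons e es => simp [pvAdj]
    rw [hadj, pvAdj_run]
    simp only [pvKeys, pvRuns, List.filterMap_cons, List.mem_append,
      List.mem_replicate]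
    by_cases h2 : 2 ≤ (rest.takeWhile (· == c)).length + 1
    · simp only [if_pos h2, List.mem_cons]
      constructor
      · rintro (⟨hne, hx⟩ | hx)
        · exact Or.inl hx
        · exact Or.inr ((ih x).mp hx)
      · rintro (hx | hx)
        · exact Or.inl ⟨by omega, hx⟩
        · exact Or.inr ((ih x).mpr hx)
    · have hz : (rest.takeWhile (· == c)).length = 0 := by omega
      simp only [hz]
      constructor
      · rintro (⟨hne, _⟩ | hx)
        · omega
        · exact (ih x).mp hx
      · intro hx; exact Or.inr ((ih x).mpr hx)

theorem pvSet_len_eq {l1 l2 : List Char} (h : ∀ x, x ∈ l1 ↔ x ∈ l2) :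
    (PySem.Set.ofList l1).length = (PySem.Set.ofList l2).length := by
  have h1 := PySem.Set.nodup_ofList (xs := l1)
  have h2 := PySem.Set.nodup_ofList (xs := l2)
  rw [← List.toFinset_card_of_nodup h1, ← List.toFinset_card_of_nodup h2]
  congr 1
  ext x
  simp [PySem.Set.mem_ofList, h x]

-- ===== VERDICT (by name: the statement is the Claim_ definition above) =====
theorem contains_two_pairs_spec : Claim_equal_contains_two_pairs := by
  intro s _
  unfold Spec_contains_two_pairs contains_two_pairs contains_two_pairs_alt
  rw [pvALoop_eq, ← PySem.Set.ofList_eq_foldl]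
  rw [pvSet_len_eq (pvMem_adj_keys s.toList)]
  rfl
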